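-- pv_equiv track=rewrite | github.com/yinshuofan/my_MineContext | scripts/test_vikingdb_v2.py | _get_canonical_headers
-- ===== SOURCE A (Python) =====
-- from typing import Any, Dict, List, Optional, Tuple
--
-- def _get_canonical_headers(headers: Dict[str, str]) -> Tuple[str, str]:
--     headers_to_sign = {}
--     for key, value in headers.items():
--         lower_key = key.lower()
--         if lower_key in ["host", "content-type", "x-date", "x-content-sha256"]:
--             headers_to_sign[lower_key] = value.strip()
--
--     sorted_headers = sorted(headers_to_sign.items())
--     canonical_headers = "\n".join([f"{k}:{v}" for k, v in sorted_headers]) + "\n"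
--     signed_headers = ";".join([k for k, _ in sorted_headers])
--     return canonical_headers, signed_headers
-- ===== SOURCE B (Python) =====
-- def _get_canonical_headers(headers):
--     lookup = {k.lower(): v for k, v in headers.items()}
--     canonical_parts = []
--     signed_parts = []
--     for k in ["content-type", "host", "x-content-sha256", "x-date"]:
--         if k in lookup:
--             canonical_parts.append(f"{k}:{lookup[k].strip()}")
--             signed_parts.append(k)
--     return "\n".join(canonical_parts) + "\n", ";".join(signed_parts)
-- ===== Notes on version B (the rewrite author's own statement) =====
-- stated objective: idiomatic
-- what changed: B replaces A's filter-into-a-dict-then-sort-the-items pipeline by a single lowercased lookup dict over all headers plus one pass over the four signable keys listed in canonical order, stripping values on access, so the explicit sort disappears.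
import Mathlib
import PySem

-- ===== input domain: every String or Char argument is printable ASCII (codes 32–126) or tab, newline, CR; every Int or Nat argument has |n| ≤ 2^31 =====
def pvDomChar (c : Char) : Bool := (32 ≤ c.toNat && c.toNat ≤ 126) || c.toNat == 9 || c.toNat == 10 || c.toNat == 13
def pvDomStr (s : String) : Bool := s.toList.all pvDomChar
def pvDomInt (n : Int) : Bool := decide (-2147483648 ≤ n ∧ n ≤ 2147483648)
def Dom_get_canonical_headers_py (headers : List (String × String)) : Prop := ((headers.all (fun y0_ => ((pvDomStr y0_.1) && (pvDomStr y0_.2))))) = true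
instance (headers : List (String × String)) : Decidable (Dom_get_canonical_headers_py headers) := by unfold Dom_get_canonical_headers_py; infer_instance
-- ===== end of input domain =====

-- B replaces A's filter-into-a-dict-then-sort pipeline by a lowercased lookup dict plus one
-- pass over the four signable keys in canonical order (idiomatic; same return value).

-- ===== PORT A =====
def get_canonical_headers_py (headers : List (String × String)) : String × String :=
  let headers_to_sign := headers.foldl (fun (d : PySem.Dict String String) kv =>
      let lower_key := PySem.Str.lower kv.1
      if lower_key ∈ ["host", "content-type", "x-date", "x-content-sha256"]
      then d.insert lower_key (PySem.Str.strip kv.2) else d) PySem.Dict.empty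
  let sorted_headers := PySem.List.sorted2 headers_to_sign.items (·.1) (·.2)
  let canonical_headers := PySem.Str.join ""
      [PySem.Str.join "\n" (sorted_headers.map (fun kv => PySem.Str.join "" [kv.1, ":", kv.2])), "\n"]
  let signed_headers := PySem.Str.join ";" (sorted_headers.map (·.1))
  (canonical_headers, signed_headers)

-- ===== PORT B =====
def get_canonical_headers_py_alt (headers : List (String × String)) : String × String :=
  let lookup := headers.foldl (fun (d : PySem.Dict String String) kv =>
      d.insert (PySem.Str.lower kv.1) kv.2) PySem.Dict.empty
  let parts := ["content-type", "host", "x-content-sha256", "x-date"].foldl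
      (fun (acc : List String × List String) k =>
        match lookup.get? k with
        | some v => (acc.1 ++ [PySem.Str.join "" [k, ":", PySem.Str.strip v]], acc.2 ++ [k])
        | none => acc) ([], [])
  (PySem.Str.join "" [PySem.Str.join "\n" parts.1, "\n"], PySem.Str.join ";" parts.2)

-- ===== PRECONDITION & SPEC =====
def Spec_get_canonical_headers_py (headers : List (String × String)) (out : String × String) : Prop := out = get_canonical_headers_py_alt headers
instance (headers : List (String × String)) (out : String × String) : Decidable (Spec_get_canonical_headers_py headers out) := by unfold Spec_get_canonical_headers_py; infer_instance

-- ===== CLAIM (what is proved, stated in full; the proofs are below) =====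
def Claim_equal_get_canonical_headers_py : Prop := ∀ (headers : List (String × String)), Dom_get_canonical_headers_py headers → Spec_get_canonical_headers_py headers (get_canonical_headers_py headers)

-- ===== LEMMAS AND PROOFS =====

-- A's membership-test key order and B's canonical iteration order over the signable keys.
def pvAllowedA : List String := ["host", "content-type", "x-date", "x-content-sha256"]
def pvAllowedB : List String := ["content-type", "host", "x-content-sha256", "x-date"]

theorem pv_mem_allowedB_of_mem_allowedA {k : String} (h : k ∈ pvAllowedA) : k ∈ pvAllowedB := by
  simp only [pvAllowedA, pvAllowedB, List.mem_cons, List.not_mem_nil, or_false] at h ⊢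
  tauto

theorem pv_mem_allowedA_of_mem_allowedB {k : String} (h : k ∈ pvAllowedB) : k ∈ pvAllowedA := by
  simp only [pvAllowedA, pvAllowedB, List.mem_cons, List.not_mem_nil, or_false] at h ⊢
  tauto

theorem pv_str_lt (a b : String) (h : a.toList < b.toList) : a < b := String.lt_iff_toList_lt.mpr h

theorem pv_allowedB_pairwise : pvAllowedB.Pairwise (fun a b => a < b) := by
  have h1 : ("content-type" : String) < "host" := pv_str_lt _ _ (by decide)
  have h2 : ("content-type" : String) < "x-content-sha256" := pv_str_lt _ _ (by decide)
  have h3 : ("content-type" : String) < "x-date" := pv_str_lt _ _ (by decide)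
  have h4 : ("host" : String) < "x-content-sha256" := pv_str_lt _ _ (by decide)
  have h5 : ("host" : String) < "x-date" := pv_str_lt _ _ (by decide)
  have h6 : ("x-content-sha256" : String) < "x-date" := pv_str_lt _ _ (by decide)
  simp only [pvAllowedB, List.pairwise_cons, List.mem_cons, List.not_mem_nil, or_false]
  refine ⟨?_, ?_, ?_, ?_, List.Pairwise.nil⟩
  · rintro x (rfl | rfl | rfl) <;> assumption
  · rintro x (rfl | rfl) <;> assumption
  · rintro x rfl; assumption
  · rintro x h; cases h

-- insertBy with two comparators that agree on a set S containing everything in sight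
theorem pv_insertBy_congr {α : Type} (lt lt' : α → α → Bool) (S : α → Prop)
    (h : ∀ a b, S a → S b → lt a b = lt' a b) (x : α) (acc : List α)
    (hx : S x) (hacc : ∀ a ∈ acc, S a) :
    PySem.List.insertBy lt x acc = PySem.List.insertBy lt' x acc := by
  induction acc with
  | nil => rfl
  | cons y ys ih =>
    have hy : S y := hacc y (by simp)
    have hys : ∀ a ∈ ys, S a := fun a ha => hacc a (by simp [ha])
    simp only [PySem.List.insertBy, h x y hx hy, ih hys]

theorem pv_foldl_insertBy_congr {α : Type} (lt lt' : α → α → Bool) (S : α → Prop)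
    (h : ∀ a b, S a → S b → lt a b = lt' a b) (l : List α) (hl : ∀ a ∈ l, S a)
    (acc : List α) (hacc : ∀ a ∈ acc, S a) :
    l.foldl (fun acc x => PySem.List.insertBy lt x acc) acc
      = l.foldl (fun acc x => PySem.List.insertBy lt' x acc) acc := by
  induction l generalizing acc with
  | nil => rfl
  | cons x t ih =>
    have hx : S x := hl x (by simp)
    have ht : ∀ a ∈ t, S a := fun a ha => hl a (by simp [ha])
    have hacc' : ∀ a ∈ PySem.List.insertBy lt x acc, S a := by
      intro a ha
      rcases (PySem.List.mem_insertBy lt x a acc).mp ha with rfl | ha'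
      · exact hx
      · exact hacc a ha'
    simp only [List.foldl_cons]
    rw [pv_insertBy_congr lt lt' S h x acc hx hacc]
    exact ih ht _ (by rwa [← pv_insertBy_congr lt lt' S h x acc hx hacc])

-- Python's tuple sort equals the sort by first component when the first component is injective on xs
theorem pv_sorted2_eq_sorted {α κ₁ κ₂ : Type} [LinearOrder κ₁] [LinearOrder κ₂]
    (xs : List α) (k1 : α → κ₁) (k2 : α → κ₂)
    (hinj : ∀ a ∈ xs, ∀ b ∈ xs, k1 a = k1 b → a = b) :
    PySem.List.sorted2 xs k1 k2 = PySem.List.sorted xs k1 := by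
  rw [PySem.List.sorted_eq_foldl_insertBy]
  show xs.foldl (fun acc x => PySem.List.insertBy
      (fun a b => decide (k1 a < k1 b) || (!decide (k1 b < k1 a) && decide (k2 a < k2 b))) x acc) []
    = xs.foldl (fun acc x => PySem.List.insertBy (fun a b => decide (k1 a < k1 b)) x acc) []
  apply pv_foldl_insertBy_congr _ _ (· ∈ xs) ?_ xs (fun a ha => ha) [] (by simp)
  intro a b ha hb
  by_cases hlt : k1 a < k1 b
  · simp [hlt]
  · by_cases hgt : k1 b < k1 a
    · simp [hlt, hgt]
    · have : a = b := hinj a ha b hb (le_antisymm (not_lt.mp hgt) (not_lt.mp hlt))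
      subst this
      simp

-- the loop body of A's dict-building pass / of B's dict-building pass
def pvStepA (d : PySem.Dict String String) (kv : String × String) : PySem.Dict String String :=
  if PySem.Str.lower kv.1 ∈ pvAllowedA then d.insert (PySem.Str.lower kv.1) (PySem.Str.strip kv.2) else d

def pvStepB (d : PySem.Dict String String) (kv : String × String) : PySem.Dict String String :=
  d.insert (PySem.Str.lower kv.1) kv.2

-- joint loop invariant of the two dict-building passes
theorem pv_dict_rel (headers : List (String × String)) (dA dB : PySem.Dict String String)
    (h1 : ∀ k ∈ pvAllowedA, dA.get? k = (dB.get? k).map PySem.Str.strip)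
    (h2 : ∀ k, k ∉ pvAllowedA → dA.get? k = none)
    (h3 : dA.keys.Nodup) :
    (∀ k ∈ pvAllowedA, (headers.foldl pvStepA dA).get? k = ((headers.foldl pvStepB dB).get? k).map PySem.Str.strip)
    ∧ (∀ k, k ∉ pvAllowedA → (headers.foldl pvStepA dA).get? k = none)
    ∧ (headers.foldl pvStepA dA).keys.Nodup := by
  induction headers generalizing dA dB with
  | nil => exact ⟨h1, h2, h3⟩
  | cons kv t ih =>
    simp only [List.foldl_cons]
    by_cases hm : PySem.Str.lower kv.1 ∈ pvAllowedA
    · apply ih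
      · intro k hk
        simp only [pvStepA, pvStepB, if_pos hm, PySem.Dict.get?_insert]
        split_ifs with he
        · rfl
        · exact h1 k hk
      · intro k hk
        have hne : k ≠ PySem.Str.lower kv.1 := fun he => hk (he ▸ hm)
        simp only [pvStepA, if_pos hm, PySem.Dict.get?_insert, if_neg hne]
        exact h2 k hk
      · simp only [pvStepA, if_pos hm]
        exact PySem.Dict.nodup_keys_insert _ _ _ h3
    · apply ih
      · intro k hk
        have hne : k ≠ PySem.Str.lower kv.1 := fun he => hm (he ▸ hk)
        simp only [pvStepA, pvStepB, if_neg hm, PySem.Dict.get?_insert, if_neg hne]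
        exact h1 k hk
      · intro k hk
        simp only [pvStepA, if_neg hm]
        exact h2 k hk
      · simp only [pvStepA, if_neg hm]
        exact h3

-- filterMap over option-valued lookups, written as filter-then-map
theorem pv_filterMap_opt (L : List String) (d : PySem.Dict String String) :
    L.filterMap (fun k => (d.get? k).map (fun v => (k, v)))
      = (L.filter (fun k => decide (k ∈ d.keys))).map (fun k => (k, d.getD k "")) := by
  induction L with
  | nil => rfl
  | cons k t ih =>
    cases hg : d.get? k with
    | none =>
      have hk : k ∉ d.keys := (PySem.Dict.get?_eq_none_iff_not_mem_keys d k).mp hg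
      simp [hg, hk, ih]
    | some v =>
      have hk : k ∈ d.keys := by
        by_contra hk
        rw [(PySem.Dict.get?_eq_none_iff_not_mem_keys d k).mpr hk] at hg
        cases hg
      have hv : d.getD k "" = v := PySem.Dict.getD_of_get?_eq_some d "" hg
      simp [hg, hk, hv, ih]

-- the sorted item list of A's dict, named: the canonical key order filtered by presence
theorem pv_sorted_items_eq (d : PySem.Dict String String)
    (hnd : d.keys.Nodup) (hsub : ∀ k, k ∉ pvAllowedA → d.get? k = none) :
    PySem.List.sorted2 d.items (·.1) (·.2)
      = pvAllowedB.filterMap (fun k => (d.get? k).map (fun v => (k, v))) := by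
  have hkeys : d.keys = d.items.map (·.1) := rfl
  have hinj : ∀ a ∈ d.items, ∀ b ∈ d.items, a.1 = b.1 → a = b := by
    intro a ha b hb hab
    exact List.inj_on_of_nodup_map (hkeys ▸ hnd) ha hb hab
  rw [pv_sorted2_eq_sorted d.items (·.1) (·.2) hinj]
  have hmemkeys : ∀ k ∈ d.keys, k ∈ pvAllowedB := by
    intro k hk
    by_contra hnk
    have : k ∉ pvAllowedA := fun h => hnk (pv_mem_allowedB_of_mem_allowedA h)
    exact absurd ((PySem.Dict.get?_eq_none_iff_not_mem_keys d k).mp (hsub k this)) (by simp [hk])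
  apply PySem.List.sorted_eq_of_perm_of_pairwise_lt
  · rw [pv_filterMap_opt]
    rw [PySem.Dict.items_eq_map_keys d hnd ""]
    apply List.Perm.map
    rw [List.perm_ext_iff_of_nodup (List.Nodup.filter _ (by decide)) hnd]
    intro k
    simp only [List.mem_filter, decide_eq_true_eq]
    constructor
    · rintro ⟨_, hk⟩; exact hk
    · intro hk; exact ⟨hmemkeys k hk, hk⟩
  · rw [pv_filterMap_opt]
    rw [List.pairwise_map]
    exact List.Pairwise.filter _ pv_allowedB_pairwise

-- B's collecting loop, named as two filterMaps
theorem pv_foldl_collect (g : String → Option String) (L : List String) (acc : List String × List String) :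
    L.foldl (fun acc k =>
        match g k with
        | some v => (acc.1 ++ [PySem.Str.join "" [k, ":", PySem.Str.strip v]], acc.2 ++ [k])
        | none => acc) acc
      = (acc.1 ++ L.filterMap (fun k => (g k).map (fun v => PySem.Str.join "" [k, ":", PySem.Str.strip v])),
         acc.2 ++ L.filterMap (fun k => (g k).map (fun _ => k))) := by
  induction L generalizing acc with
  | nil => simp
  | cons k t ih =>
    cases hg : g k with
    | none => simp [hg, ih]
    | some v => simp [hg, ih]

-- ===== VERDICT (by name: the statement is the Claim_ definition above) =====
theorem get_canonical_headers_py_spec : Claim_equal_get_canonical_headers_py := by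
  intro headers _hdom
  unfold Spec_get_canonical_headers_py get_canonical_headers_py get_canonical_headers_py_alt
  simp only []
  have hdA : headers.foldl (fun (d : PySem.Dict String String) kv =>
      let lower_key := PySem.Str.lower kv.1
      if lower_key ∈ ["host", "content-type", "x-date", "x-content-sha256"]
      then d.insert lower_key (PySem.Str.strip kv.2) else d) PySem.Dict.empty
      = headers.foldl pvStepA PySem.Dict.empty := rfl
  have hdB : headers.foldl (fun (d : PySem.Dict String String) kv =>
      d.insert (PySem.Str.lower kv.1) kv.2) PySem.Dict.empty
      = headers.foldl pvStepB PySem.Dict.empty := rfl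
  rw [hdA, hdB]
  obtain ⟨h1, h2, h3⟩ := pv_dict_rel headers PySem.Dict.empty PySem.Dict.empty
    (by intro k _; simp [PySem.Dict.get?_empty])
    (by intro k _; simp [PySem.Dict.get?_empty])
    PySem.Dict.nodup_keys_empty
  rw [pv_sorted_items_eq _ h3 h2]
  rw [pv_foldl_collect ((headers.foldl pvStepB PySem.Dict.empty).get?)
      ["content-type", "host", "x-content-sha256", "x-date"] ([], [])]
  simp only [pvAllowedB, List.map_filterMap, List.nil_append]
  have hkAfun : ∀ k ∈ (["content-type", "host", "x-content-sha256", "x-date"] : List String),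
      k ∈ pvAllowedA := fun k hk => pv_mem_allowedA_of_mem_allowedB (by simpa [pvAllowedB] using hk)
  have hfm1 : List.filterMap
      (fun x => Option.map (fun kv => PySem.Str.join "" [kv.1, ":", kv.2])
        (Option.map (fun v => (x, v)) ((List.foldl pvStepA PySem.Dict.empty headers).get? x)))
      ["content-type", "host", "x-content-sha256", "x-date"]
    = List.filterMap
      (fun k => Option.map (fun v => PySem.Str.join "" [k, ":", PySem.Str.strip v])
        ((List.foldl pvStepB PySem.Dict.empty headers).get? k))
      ["content-type", "host", "x-content-sha256", "x-date"] := by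
    apply List.filterMap_congr
    intro k hk
    rw [h1 k (hkAfun k hk), Option.map_map, Option.map_map]
    rfl
  have hfm2 : List.filterMap
      (fun x => Option.map (fun x => x.1)
        (Option.map (fun v => (x, v)) ((List.foldl pvStepA PySem.Dict.empty headers).get? x)))
      ["content-type", "host", "x-content-sha256", "x-date"]
    = List.filterMap
      (fun k => Option.map (fun _ => k) ((List.foldl pvStepB PySem.Dict.empty headers).get? k))
      ["content-type", "host", "x-content-sha256", "x-date"] := by
    apply List.filterMap_congr
    intro k hk
    rw [h1 k (hkAfun k hk), Option.map_map, Option.map_map]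
    rfl
  rw [hfm1, hfm2]
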